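-- pv_equiv track=rewrite | github.com/ShieldCraft-AI/ShieldCraft-Engine | src/shieldcraft/services/guidance/guidance.py | prioritize_missing
-- ===== SOURCE A (Python) =====
-- from typing import List, Dict
--
-- MISSING_PRIORITY: Dict[str, int] = {
--     "sections_empty": 10,
--     "invariants_empty": 20,
--     "model_empty": 30,
--     "missing_instructions": 40,
-- }
--
-- def prioritize_missing(missing: List[Dict]) -> List[Dict]:
--     """Sort and deduplicate what_is_missing_next entries deterministically.
--
--     Sorting order: by MISSING_PRIORITY (default large), then by code lexicographically.
--     Duplicate codes removed, keeping first occurrence.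
--     """
--     seen = set()
--     out = []
--     for item in sorted(missing, key=lambda x: (MISSING_PRIORITY.get(x.get("code"), 1000), x.get("code", ""))):
--         code = item.get("code")
--         if code in seen:
--             continue
--         seen.add(code)
--         out.append(item)
--     return out
-- ===== SOURCE B (Python) =====
-- from typing import List, Dict
--
-- MISSING_PRIORITY: Dict[str, int] = {
--     "sections_empty": 10,
--     "invariants_empty": 20,
--     "model_empty": 30,
--     "missing_instructions": 40,
-- }
--
-- def prioritize_missing(missing: List[Dict]) -> List[Dict]:
--     """Deduplicate first (first occurrence per code), then stable-sort by priority/code."""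
--     dedup = {}
--     for item in missing:
--         dedup.setdefault(item.get("code"), item)
--     return sorted(
--         dedup.values(),
--         key=lambda x: (MISSING_PRIORITY.get(x.get("code"), 1000), x.get("code", "")),
--     )
-- ===== Notes on version B (the rewrite author's own statement) =====
-- stated objective: alternative
-- what changed: B deduplicates first in one pass over the original list (insertion-ordered dict keyed by code; setdefault keeps the first occurrence) and then sorts only the surviving items, instead of A's sort-the-whole-list-then-dedup; stability of the sort makes the outputs identical.
import Mathlib
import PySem

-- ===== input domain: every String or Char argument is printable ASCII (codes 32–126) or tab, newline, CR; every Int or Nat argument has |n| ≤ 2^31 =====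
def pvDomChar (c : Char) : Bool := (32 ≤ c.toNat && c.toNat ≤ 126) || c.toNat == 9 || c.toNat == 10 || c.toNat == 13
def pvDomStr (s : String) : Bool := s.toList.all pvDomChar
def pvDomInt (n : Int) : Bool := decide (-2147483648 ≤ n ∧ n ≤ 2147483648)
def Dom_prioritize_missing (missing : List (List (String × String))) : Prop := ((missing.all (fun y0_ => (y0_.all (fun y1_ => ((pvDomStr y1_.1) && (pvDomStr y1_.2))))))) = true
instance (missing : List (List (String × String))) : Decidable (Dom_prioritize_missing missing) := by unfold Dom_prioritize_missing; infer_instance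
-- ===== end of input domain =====

-- B dedups first (dict keyed by code, keeping the first occurrence) and then sorts the
-- surviving items, instead of A's sort-the-whole-list-then-dedup; stability of the sort
-- makes the results identical (objective: alternative decomposition).

-- ===== PORT A =====
-- shared module constant and the key lambdas (both Pythons use the very same expressions)
def pvMISSING_PRIORITY : PySem.Dict String Int :=
  PySem.Dict.mk [("sections_empty", 10), ("invariants_empty", 20), ("model_empty", 30), ("missing_instructions", 40)]

-- x.get("code")  (a Python dict is the assoc list; Dict.get? is first-match lookup)
def pvCode (item : List (String × String)) : Option String :=
  PySem.Dict.get? (PySem.Dict.mk item) "code"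

-- MISSING_PRIORITY.get(x.get("code"), 1000); None is never a key of MISSING_PRIORITY,
-- so Python's .get(None, 1000) = 1000 — the `none` branch below.
def pvK1 (x : List (String × String)) : Int :=
  match pvCode x with
  | some c => PySem.Dict.getD pvMISSING_PRIORITY c 1000
  | none => 1000

-- x.get("code", "")
def pvK2 (x : List (String × String)) : String :=
  PySem.Dict.getD (PySem.Dict.mk x) "code" ""

def prioritize_missing (missing : List (List (String × String))) : List (List (String × String)) :=
  -- for item in sorted(missing, key=λx.(K1 x, K2 x)): dedup by code keeping first
  let sortedMissing := PySem.List.sorted2 missing pvK1 pvK2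
  (sortedMissing.foldl
    (fun (st : PySem.Set (Option String) × List (List (String × String))) item =>
      let code := pvCode item
      if PySem.Set.contains st.1 code then st
      else (PySem.Set.add st.1 code, st.2 ++ [item]))
    (PySem.Set.empty, [])).2

-- ===== PORT B =====
def prioritize_missing_alt (missing : List (List (String × String))) : List (List (String × String)) :=
  -- dedup = {}; for item in missing: dedup.setdefault(item.get("code"), item)
  let dedup := missing.foldl
    (fun (d : PySem.Dict (Option String) (List (String × String))) item =>
      PySem.Dict.setdefault d (pvCode item) item)
    PySem.Dict.empty
  -- sorted(dedup.values(), key=λx.(K1 x, K2 x))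
  PySem.List.sorted2 (PySem.Dict.values dedup) pvK1 pvK2

-- ===== PRECONDITION & SPEC =====
def Spec_prioritize_missing (missing : List (List (String × String))) (out : List (List (String × String))) : Prop := out = prioritize_missing_alt missing
instance (missing : List (List (String × String))) (out : List (List (String × String))) : Decidable (Spec_prioritize_missing missing out) := by unfold Spec_prioritize_missing; infer_instance

-- ===== CLAIM (what is proved, stated in full; the proofs are below) =====
def Claim_equal_prioritize_missing : Prop := ∀ (missing : List (List (String × String))), Dom_prioritize_missing missing → Spec_prioritize_missing missing (prioritize_missing missing)

-- ===== LEMMAS AND PROOFS =====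

-- the comparison the stable insertion sort of both ports uses (sorted2's lexicographic test)
def pvLt (a b : List (String × String)) : Bool :=
  decide (pvK1 a < pvK1 b) || (!decide (pvK1 b < pvK1 a) && decide (pvK2 a < pvK2 b))

-- left-to-right dedup by key c, with an accumulated seen list
def pvDD {α β : Type} [BEq β] (c : α → β) : List β → List α → List α
  | _, [] => []
  | s, x :: t => if s.contains (c x) then pvDD c s t else x :: pvDD c (s ++ [c x]) t

-- insertion sort as both ports' sorted2 computes it
def pvISort {α : Type} (lt : α → α → Bool) (xs : List α) : List α :=
  xs.foldl (fun acc x => PySem.List.insertBy lt x acc) []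

theorem pvSorted2_eq (xs : List (List (String × String))) :
    PySem.List.sorted2 xs pvK1 pvK2 = pvISort pvLt xs := rfl

theorem pvK2_code (x : List (String × String)) : pvK2 x = (pvCode x).getD "" := by
  rw [pvK2, PySem.Dict.getD_eq_get?_getD]; rfl

theorem pvLt_true_iff (a b : List (String × String)) :
    pvLt a b = true ↔ (pvK1 a < pvK1 b ∨ (¬ pvK1 b < pvK1 a ∧ pvK2 a < pvK2 b)) := by
  simp [pvLt]

theorem pvLt_congr (a b : List (String × String)) (h : pvCode a = pvCode b)
    (d : List (String × String)) : pvLt a d = pvLt b d ∧ pvLt d a = pvLt d b := by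
  have h1 : pvK1 a = pvK1 b := by unfold pvK1; rw [h]
  have h2 : pvK2 a = pvK2 b := by rw [pvK2_code, pvK2_code, h]
  constructor <;> simp [pvLt, h1, h2]

theorem pvLt_asymm (a b : List (String × String)) (h : pvLt a b = true) : pvLt b a = false := by
  rw [pvLt_true_iff] at h
  rw [← Bool.not_eq_true, pvLt_true_iff]
  push_neg
  rcases h with h1 | ⟨h1, h2⟩
  · exact ⟨le_of_lt h1, fun hn => absurd h1 (not_lt.mpr hn)⟩
  · exact ⟨not_lt.mp h1, fun _ => le_of_lt h2⟩

theorem pvLt_trans' (a b d : List (String × String)) (hab : pvLt a b = true)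
    (hdb : pvLt d b = false) : pvLt a d = true := by
  rw [pvLt_true_iff] at hab ⊢
  rw [← Bool.not_eq_true, pvLt_true_iff] at hdb
  push_neg at hdb
  obtain ⟨hd1, hd2⟩ := hdb
  rcases hab with h1 | ⟨h1, h2⟩
  · exact Or.inl (lt_of_lt_of_le h1 hd1)
  · rcases (show pvK1 d ≤ pvK1 b ∨ pvK1 b < pvK1 d by omega) with hle | hlt
    · have heq : pvK1 b = pvK1 d := le_antisymm hd1 hle
      have hs : pvK2 b ≤ pvK2 d := hd2 hle
      exact Or.inr ⟨heq ▸ h1, lt_of_lt_of_le h2 hs⟩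
    · exact Or.inl (lt_of_le_of_lt (not_lt.mp h1) hlt)

theorem pvLt_irrefl (a : List (String × String)) : pvLt a a = false := by
  cases h : pvLt a a with
  | false => rfl
  | true => exact absurd (pvLt_asymm a a h) (by simp [h])

theorem pvDD_mem {α β : Type} [BEq β] (c : α → β) (xs : List α) :
    ∀ s y, y ∈ pvDD c s xs → y ∈ xs := by
  induction xs with
  | nil => intro s y h; simp [pvDD] at h
  | cons x t ih =>
    intro s y h
    cases hc : s.contains (c x) with
    | true =>
      simp only [pvDD, hc, if_true] at h
      exact List.mem_cons_of_mem _ (ih s y h)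
    | false =>
      simp only [pvDD, hc, Bool.false_eq_true, if_false, List.mem_cons] at h
      rcases h with h | h
      · exact h ▸ List.mem_cons_self
      · exact List.mem_cons_of_mem _ (ih _ y h)

theorem pvDD_congr {α β : Type} [BEq β] (c : α → β) (xs : List α) :
    ∀ s s', (∀ y ∈ xs, s.contains (c y) = s'.contains (c y)) → pvDD c s xs = pvDD c s' xs := by
  induction xs with
  | nil => intro s s' _; rfl
  | cons x t ih =>
    intro s s' h
    have hx := h x List.mem_cons_self
    have htail : ∀ y ∈ t, (s ++ [c x]).contains (c y) = (s' ++ [c x]).contains (c y) := by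
      intro y hy
      rw [List.contains_append, List.contains_append, h y (List.mem_cons_of_mem _ hy)]
    cases hc : s'.contains (c x) with
    | true =>
      rw [pvDD, pvDD, hx, hc, if_pos rfl, if_pos rfl]
      exact ih s s' (fun y hy => h y (List.mem_cons_of_mem _ hy))
    | false =>
      rw [pvDD, pvDD, hx, hc]
      simp only [Bool.false_eq_true, if_false]
      rw [ih _ _ htail]

theorem pvDD_skip {α β : Type} [BEq β] (c : α → β) (lt : α → α → Bool) (x : α) (ys : List α) :
    ∀ s, s.contains (c x) = true → pvDD c s (PySem.List.insertBy lt x ys) = pvDD c s ys := by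
  induction ys with
  | nil => intro s hs; simp [PySem.List.insertBy, pvDD, hs]
  | cons y t ih =>
    intro s hs
    cases hlt : lt x y with
    | true => simp [PySem.List.insertBy, hlt, pvDD, hs]
    | false =>
      simp only [PySem.List.insertBy, hlt, Bool.false_eq_true, if_false]
      cases hy : s.contains (c y) with
      | true => simp [pvDD, hy, ih s hs]
      | false =>
        have hs' : (s ++ [c y]).contains (c x) = true := by
          rw [List.contains_append, hs]; rfl
        simp [pvDD, hy, ih _ hs']

theorem pvDD_drop (c : List (String × String) → Option String) (x : List (String × String))
    (hc : c = pvCode) :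
    ∀ (S : List (List (String × String))) s,
      S.Pairwise (fun a b => pvLt b a = false) → (∃ y ∈ S, c y = c x) →
      pvDD c s (PySem.List.insertBy pvLt x S) = pvDD c s S := by
  intro S
  induction S with
  | nil => intro s _ h; simp at h
  | cons y t ih =>
    intro s hpw ⟨y₀, hy₀mem, hy₀code⟩
    have hxy : pvLt x y = false := by
      cases hmem : decide (y₀ = y) with
      | true =>
        have heq : y₀ = y := of_decide_eq_true hmem
        have h1 : pvLt x y = pvLt y₀ y := ((pvLt_congr y₀ x (hc ▸ hy₀code) y).1).symm
        rw [h1, heq]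
        exact pvLt_irrefl y
      | false =>
        have hne : y₀ ≠ y := of_decide_eq_false hmem
        have hy₀t : y₀ ∈ t := by
          rcases List.mem_cons.mp hy₀mem with h | h
          · exact absurd h hne
          · exact h
        have h1 : pvLt y₀ y = false := (List.pairwise_cons.mp hpw).1 y₀ hy₀t
        rw [← (pvLt_congr y₀ x (hc ▸ hy₀code) y).1]
        exact h1
    simp only [PySem.List.insertBy, hxy, Bool.false_eq_true, if_false]
    have hpwt := (List.pairwise_cons.mp hpw).2
    cases hmem : decide (y₀ = y) with
    | true =>
      have heq : y₀ = y := of_decide_eq_true hmem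
      have hcxy : c x = c y := by rw [← hy₀code, heq]
      cases hy : s.contains (c y) with
      | true =>
        have hsx : s.contains (c x) = true := by rw [hcxy]; exact hy
        simp only [pvDD, hy, if_true]
        exact pvDD_skip c pvLt x t s hsx
      | false =>
        have hsx : (s ++ [c y]).contains (c x) = true := by
          rw [List.contains_append, hcxy]; simp
        simp only [pvDD, hy, Bool.false_eq_true, if_false]
        rw [pvDD_skip c pvLt x t _ hsx]
    | false =>
      have hne : y₀ ≠ y := of_decide_eq_false hmem
      have hy₀t : y₀ ∈ t := by
        rcases List.mem_cons.mp hy₀mem with h | h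
        · exact absurd h hne
        · exact h
      cases hy : s.contains (c y) with
      | true =>
        simp only [pvDD, hy, if_true]
        exact ih s hpwt ⟨y₀, hy₀t, hy₀code⟩
      | false =>
        simp only [pvDD, hy, Bool.false_eq_true, if_false]
        rw [ih _ hpwt ⟨y₀, hy₀t, hy₀code⟩]

theorem pvInsertBy_all_lt {α : Type} (lt : α → α → Bool) (x : α) (L : List α)
    (h : ∀ z ∈ L, lt x z = true) : PySem.List.insertBy lt x L = x :: L := by
  cases L with
  | nil => rfl
  | cons z t => simp [PySem.List.insertBy, h z List.mem_cons_self]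

theorem pvDD_insert (c : List (String × String) → Option String) (x : List (String × String)) :
    ∀ (S : List (List (String × String))) s,
      S.Pairwise (fun a b => pvLt b a = false) → (∀ y ∈ S, c y ≠ c x) →
      s.contains (c x) = false →
      pvDD c s (PySem.List.insertBy pvLt x S) = PySem.List.insertBy pvLt x (pvDD c s S) := by
  intro S
  induction S with
  | nil =>
    intro s _ _ hs
    simp only [PySem.List.insertBy, pvDD, hs, Bool.false_eq_true, if_false]
  | cons y t ih =>
    intro s hpw hcodes hs
    have hpwt := (List.pairwise_cons.mp hpw).2
    have hcodest : ∀ y' ∈ t, c y' ≠ c x := fun y' hy' => hcodes y' (List.mem_cons_of_mem _ hy')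
    have hcy : c y ≠ c x := hcodes y List.mem_cons_self
    cases hlt : pvLt x y with
    | true =>
      -- x is inserted in front; every element of y :: t is strictly greater
      have hall : ∀ z ∈ y :: t, pvLt x z = true := by
        intro z hz
        rcases List.mem_cons.mp hz with h | h
        · exact h ▸ hlt
        · exact pvLt_trans' x y z hlt ((List.pairwise_cons.mp hpw).1 z h)
      simp only [PySem.List.insertBy, hlt, if_true]
      have hdrop : pvDD c (s ++ [c x]) (y :: t) = pvDD c s (y :: t) := by
        apply pvDD_congr
        intro z hz
        rw [List.contains_append, List.contains_cons, List.contains_nil,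
          beq_eq_false_iff_ne.mpr (hcodes z hz), Bool.or_false, Bool.or_false]
      rw [pvInsertBy_all_lt pvLt x (pvDD c s (y :: t))
        (fun z hz => hall z (pvDD_mem c (y :: t) s z hz))]
      conv_lhs => rw [pvDD]
      rw [hs]
      simp only [Bool.false_eq_true, if_false]
      rw [hdrop]
    | false =>
      simp only [PySem.List.insertBy, hlt, Bool.false_eq_true, if_false]
      cases hy : s.contains (c y) with
      | true =>
        simp only [pvDD, hy, if_true]
        exact ih s hpwt hcodest hs
      | false =>
        have hs' : (s ++ [c y]).contains (c x) = false := by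
          rw [List.contains_append, hs]
          simp only [List.contains_cons, List.contains_nil, Bool.or_false, Bool.false_or]
          exact beq_eq_false_iff_ne.mpr (fun h => hcy h.symm)
        simp only [pvDD, hy, Bool.false_eq_true, if_false]
        rw [ih _ hpwt hcodest hs']
        cases hL : pvDD c (s ++ [c y]) t with
        | nil => simp [PySem.List.insertBy, hlt]
        | cons z t' => simp [PySem.List.insertBy, hlt]

theorem pvInsertBy_pairwise (x : List (String × String)) (ys : List (List (String × String)))
    (h : ys.Pairwise (fun a b => pvLt b a = false)) :
    (PySem.List.insertBy pvLt x ys).Pairwise (fun a b => pvLt b a = false) := by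
  induction ys with
  | nil => simp [PySem.List.insertBy]
  | cons y t ih =>
    have hpw := List.pairwise_cons.mp h
    cases hlt : pvLt x y with
    | true =>
      simp only [PySem.List.insertBy, hlt, if_true]
      refine List.pairwise_cons.mpr ⟨?_, h⟩
      intro z hz
      rcases List.mem_cons.mp hz with hzy | hzt
      · exact hzy ▸ pvLt_asymm x y hlt
      · exact pvLt_asymm x z (pvLt_trans' x y z hlt (hpw.1 z hzt))
    | false =>
      simp only [PySem.List.insertBy, hlt, Bool.false_eq_true, if_false]
      refine List.pairwise_cons.mpr ⟨?_, ih hpw.2⟩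
      intro z hz
      rcases (PySem.List.mem_insertBy pvLt x z t).mp hz with hzx | hzt
      · exact hzx ▸ hlt
      · exact hpw.1 z hzt

theorem pvISort_pairwise_aux (xs : List (List (String × String))) :
    ∀ acc, acc.Pairwise (fun a b => pvLt b a = false) →
      (xs.foldl (fun acc x => PySem.List.insertBy pvLt x acc) acc).Pairwise
        (fun a b => pvLt b a = false) := by
  induction xs with
  | nil => intro acc h; exact h
  | cons x t ih =>
    intro acc h
    exact ih _ (pvInsertBy_pairwise x acc h)

theorem pvISort_pairwise (xs : List (List (String × String))) :
    (pvISort pvLt xs).Pairwise (fun a b => pvLt b a = false) :=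
  pvISort_pairwise_aux xs [] List.Pairwise.nil

theorem pvMem_foldl_insertBy {α : Type} (lt : α → α → Bool) (xs : List α) :
    ∀ acc y, (y ∈ xs.foldl (fun acc x => PySem.List.insertBy lt x acc) acc) ↔ (y ∈ acc ∨ y ∈ xs) := by
  induction xs with
  | nil => intro acc y; simp
  | cons x t ih =>
    intro acc y
    simp only [List.foldl_cons, ih, PySem.List.mem_insertBy, List.mem_cons]
    tauto

theorem pvMem_isort {α : Type} (lt : α → α → Bool) (xs : List α) (y : α) :
    y ∈ pvISort lt xs ↔ y ∈ xs := by
  simp [pvISort, pvMem_foldl_insertBy]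

theorem pvISort_append_singleton {α : Type} (lt : α → α → Bool) (xs : List α) (x : α) :
    pvISort lt (xs ++ [x]) = PySem.List.insertBy lt x (pvISort lt xs) := by
  simp [pvISort, List.foldl_append]

theorem pvDD_append_singleton {α β : Type} [BEq β] [LawfulBEq β] (c : α → β) (x : α) :
    ∀ (xs : List α) s, pvDD c s (xs ++ [x]) =
      pvDD c s xs ++ (if s.contains (c x) || (xs.map c).contains (c x) then [] else [x]) := by
  intro xs
  induction xs with
  | nil =>
    intro s
    rw [List.nil_append, List.map_nil, List.contains_nil, Bool.or_false]
    cases hs : s.contains (c x) with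
    | true =>
      have hm : c x ∈ s := List.contains_iff_mem.mp hs
      simp [pvDD, hm]
    | false =>
      have hm : c x ∉ s := fun hm => by rw [List.contains_iff_mem.mpr hm] at hs; cases hs
      simp [pvDD, hm]
  | cons y t ih =>
    intro s
    rw [List.cons_append]
    cases hy : s.contains (c y) with
    | true =>
      simp only [pvDD, hy, if_true, ih s]
      congr 1
      by_cases hxy : c x = c y
      · have hsx : s.contains (c x) = true := by rw [hxy]; exact hy
        rw [hsx, Bool.true_or, Bool.true_or]
      · rw [List.map_cons, List.contains_cons, beq_eq_false_iff_ne.mpr (fun h => hxy h), Bool.false_or]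
    | false =>
      simp only [pvDD, hy, Bool.false_eq_true, if_false, ih]
      rw [List.cons_append]
      congr 2
      rw [List.map_cons, List.contains_append, List.contains_cons, List.contains_cons,
        List.contains_nil, Bool.or_false, Bool.or_assoc]

theorem pvComm (xs : List (List (String × String))) :
    pvDD pvCode [] (pvISort pvLt xs) = pvISort pvLt (pvDD pvCode [] xs) := by
  induction xs using List.reverseRecOn with
  | nil => rfl
  | append_singleton xs x ih =>
    rw [pvISort_append_singleton, pvDD_append_singleton pvCode x xs []]
    simp only [List.contains_nil, Bool.false_or]
    cases hb : (xs.map pvCode).contains (pvCode x) with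
    | true =>
      simp only [if_true, List.append_nil]
      rw [← ih]
      apply pvDD_drop pvCode x rfl _ _ (pvISort_pairwise xs)
      have : pvCode x ∈ xs.map pvCode := List.contains_iff_exists_mem_beq.mp hb |>.elim
        (fun a ⟨ha, hbeq⟩ => (eq_of_beq hbeq) ▸ ha)
      rcases List.mem_map.mp this with ⟨y, hy, hcy⟩
      exact ⟨y, (pvMem_isort pvLt xs y).mpr hy, hcy⟩
    | false =>
      simp only [Bool.false_eq_true, if_false]
      rw [pvISort_append_singleton, ← ih]
      apply pvDD_insert pvCode x _ _ (pvISort_pairwise xs) _ rfl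
      intro y hy hcy
      have hyxs : y ∈ xs := (pvMem_isort pvLt xs y).mp hy
      have hmem : pvCode x ∈ xs.map pvCode := hcy ▸ List.mem_map_of_mem hyxs
      have hb' : (xs.map pvCode).contains (pvCode x) = true := List.contains_iff_mem.mpr hmem
      rw [hb'] at hb
      cases hb

theorem pvA_loop (xs : List (List (String × String))) :
    ∀ (s : PySem.Set (Option String)) (out : List (List (String × String))),
      (xs.foldl
        (fun (st : PySem.Set (Option String) × List (List (String × String))) item =>
          if PySem.Set.contains st.1 (pvCode item) then st
          else (PySem.Set.add st.1 (pvCode item), st.2 ++ [item]))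
        (s, out)).2 = out ++ pvDD pvCode s xs := by
  induction xs with
  | nil => intro s out; simp [pvDD]
  | cons x t ih =>
    intro s out
    cases hc : PySem.Set.contains s (pvCode x) with
    | true =>
      have hc' : List.contains s (pvCode x) = true := hc
      simp only [List.foldl_cons, hc, if_true, pvDD, hc']
      exact ih s out
    | false =>
      have hc' : List.contains s (pvCode x) = false := hc
      simp only [List.foldl_cons, PySem.Set.contains, PySem.Set.add, hc', Bool.false_eq_true,
        if_false, pvDD]
      exact (ih (s ++ [pvCode x]) (out ++ [x])).trans (by simp)

theorem pvContains_eq_keys_contains (d : PySem.Dict (Option String) (List (String × String)))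
    (k : Option String) : d.contains k = (d.keys).contains k := by
  cases hc : (d.keys).contains k with
  | true =>
    exact (PySem.Dict.contains_iff_mem_keys d k).mpr (List.contains_iff_mem.mp hc)
  | false =>
    rw [← Bool.not_eq_true]
    intro hdc
    have hkm : k ∈ d.keys := (PySem.Dict.contains_iff_mem_keys d k).mp hdc
    have hk' : d.keys.contains k = true := List.contains_iff_mem.mpr hkm
    rw [hk'] at hc
    cases hc

theorem pvB_loop (xs : List (List (String × String))) :
    ∀ (d : PySem.Dict (Option String) (List (String × String))),
      (xs.foldl (fun d item => PySem.Dict.setdefault d (pvCode item) item) d).values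
        = d.values ++ pvDD pvCode d.keys xs := by
  induction xs with
  | nil => intro d; simp [pvDD]
  | cons x t ih =>
    intro d
    cases hc : d.contains (pvCode x) with
    | true =>
      have hk : (d.keys).contains (pvCode x) = true := by
        rw [← pvContains_eq_keys_contains]; exact hc
      simp only [List.foldl_cons, PySem.Dict.setdefault, hc, if_true, pvDD, hk]
      exact ih d
    | false =>
      have hk : (d.keys).contains (pvCode x) = false := by
        rw [← pvContains_eq_keys_contains]; exact hc
      simp only [List.foldl_cons, PySem.Dict.setdefault, hc, Bool.false_eq_true, if_false,
        pvDD, hk]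
      exact (ih ⟨d.items ++ [(pvCode x, x)]⟩).trans
        (by simp [PySem.Dict.values, PySem.Dict.keys])

-- ===== VERDICT (by name: the statement is the Claim_ definition above) =====
theorem prioritize_missing_spec : Claim_equal_prioritize_missing := by
  intro missing _
  show prioritize_missing missing = prioritize_missing_alt missing
  unfold prioritize_missing prioritize_missing_alt
  dsimp only
  rw [pvB_loop]
  simp only [PySem.Dict.values, PySem.Dict.keys, PySem.Dict.empty, List.map_nil,
    List.nil_append]
  rw [pvSorted2_eq, pvSorted2_eq, pvA_loop]
  simp only [List.nil_append]
  exact pvComm missing
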